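-- pv_equiv track=rewrite | github.com/gavlooth/hvm4-pathfinding | bench/gen.py | ceil_log
-- ===== SOURCE A (Python) =====
-- def ceil_log(n, base):
--     if n <= base:
--         return 1
--     d, cap = 1, base
--     while cap < n:
--         d += 1
--         cap *= base
--     return d
-- ===== SOURCE B (Python) =====
-- def ceil_log(n, base):
--     # Shrink n toward 1 by ceiling division, counting steps, instead of
--     # growing a power cap up toward n; clamp the count to a minimum of 1.
--     d = 0
--     while n > 1:
--         n = -(-n // base)
--         d += 1
--     return max(1, d)
-- ===== Notes on version B (the rewrite author's own statement) =====
-- stated objective: alternative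
-- what changed: Instead of growing a power cap (d, cap*=base) up toward n, B repeatedly applies ceiling division to shrink n toward 1, counting iterations, and clamps the count to a minimum of 1.
-- outside the precondition, e.g. on ceil_log(5, -2): A returns 4, B returns 1; on ceil_log(0, -1): A returns 2, B returns 1
import Mathlib
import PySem

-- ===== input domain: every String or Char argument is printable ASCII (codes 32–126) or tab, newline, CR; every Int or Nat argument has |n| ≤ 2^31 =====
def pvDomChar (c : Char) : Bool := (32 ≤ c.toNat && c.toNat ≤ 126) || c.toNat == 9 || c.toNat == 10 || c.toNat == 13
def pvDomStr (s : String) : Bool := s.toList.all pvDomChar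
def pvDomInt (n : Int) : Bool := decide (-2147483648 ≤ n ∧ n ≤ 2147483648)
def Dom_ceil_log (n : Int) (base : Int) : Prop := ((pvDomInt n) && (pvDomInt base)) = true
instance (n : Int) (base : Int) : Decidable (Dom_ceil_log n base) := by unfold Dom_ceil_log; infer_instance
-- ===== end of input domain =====

-- B replaces A's growing-power loop by a shrinking ceiling-division loop (alternative decomposition, same cost).

-- ===== PORT A =====
-- A's while loop as fuel recursion; fuel 63 suffices on Dom ∧ Pre_ (base ≥ 2 there whenever
-- the loop runs, so at most 32 iterations for |n| ≤ 2^31); outside Pre_ A's Python can loop forever.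
def ceilLogLoopA (fuel : Nat) (d : Int) (cap : Int) (n : Int) (base : Int) : Int :=
  match fuel with
  | 0 => d
  | fuel + 1 => if cap < n then ceilLogLoopA fuel (d + 1) (cap * base) n base else d

def ceil_log (n : Int) (base : Int) : Int :=
  if n ≤ base then 1 else ceilLogLoopA 63 1 base n base

-- ===== PORT B =====
-- B's while loop: shrink n by ceiling division -(-n // base), counting steps.
def ceilLogLoopB (fuel : Nat) (n : Int) (base : Int) (d : Int) : Int :=
  match fuel with
  | 0 => d
  | fuel + 1 =>
      if 1 < n then ceilLogLoopB fuel (-(PySem.Int.floordiv (-n) base)) base (d + 1) else d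

def ceil_log_alt (n : Int) (base : Int) : Int :=
  max 1 (ceilLogLoopB 64 n base 0)

-- ===== PRECONDITION & SPEC =====
-- Pre_ excludes inputs with n > base and base ≤ 1: there A's cap never outgrows n in a meaningful
-- way — A loops forever for base ∈ {0, 1} (and for base = -1 with n ≥ 2), and for negative bases it
-- returns an accidental value driven by sign oscillation of cap (e.g. A(5, -2) = 4), a corner no one
-- would specify; B's natural value there is 1 (or, for base = 0, a ZeroDivisionError).
def Pre_ceil_log (n : Int) (base : Int) : Prop := n ≤ base ∨ 2 ≤ base
instance (n : Int) (base : Int) : Decidable (Pre_ceil_log n base) := by unfold Pre_ceil_log; infer_instance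
def pvWitness_ceil_log : Int × Int := (100, 3)

def Spec_ceil_log (n : Int) (base : Int) (out : Int) : Prop := out = ceil_log_alt n base
instance (n : Int) (base : Int) (out : Int) : Decidable (Spec_ceil_log n base out) := by unfold Spec_ceil_log; infer_instance

-- ===== CLAIM (what is proved, stated in full; the proofs are below) =====
def Claim_equal_ceil_log : Prop := ∀ (n : Int) (base : Int), Dom_ceil_log n base → Pre_ceil_log n base → Spec_ceil_log n base (ceil_log n base)

-- ===== LEMMAS AND PROOFS =====

-- B's loop result is at least its starting counter.
theorem loopB_ge (fuel : Nat) (n base d : Int) : d ≤ ceilLogLoopB fuel n base d := by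
  induction fuel generalizing n d with
  | zero => simp [ceilLogLoopB]
  | succ f ih =>
      simp only [ceilLogLoopB]
      split
      · exact le_trans (by omega) (ih _ _)
      · exact le_refl d

-- Ceiling division: -((-a) // b) = ⌈a / b⌉ characterised by brackets (0 < b).
theorem ceildiv_le_iff (a b q : Int) (hb : 0 < b) :
    -(PySem.Int.floordiv (-a) b) ≤ q ↔ a ≤ q * b := by
  set c := -(PySem.Int.floordiv (-a) b) with hc
  have h := (PySem.Int.neg_floordiv_neg_eq_iff_of_pos (a := a) (b := b) (q := c) hb).mp hc.symm
  constructor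
  · intro hle
    calc a ≤ c * b := h.2
      _ ≤ q * b := by exact mul_le_mul_of_nonneg_right hle (le_of_lt hb)
  · intro hab
    by_contra hlt
    push Not at hlt
    have : q * b < a := by
      calc q * b ≤ (c - 1) * b := by nlinarith
        _ < a := h.1
    omega

-- Composition: ceil(ceil(a / c) / b) = ceil(a / (c * b)) for 0 < c, 0 < b.
theorem ceildiv_ceildiv (a c b : Int) (hc : 0 < c) (hb : 0 < b) :
    -(PySem.Int.floordiv (-(-(PySem.Int.floordiv (-a) c))) b) = -(PySem.Int.floordiv (-a) (c * b)) := by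
  have hcb : 0 < c * b := mul_pos hc hb
  -- both sides satisfy the same bracket characterisation
  apply le_antisymm
  · rw [ceildiv_le_iff _ _ _ hb, ceildiv_le_iff _ _ _ hc]
    rw [show -(PySem.Int.floordiv (-a) (c * b)) * b * c = -(PySem.Int.floordiv (-a) (c * b)) * (c * b) by ring]
    exact ((ceildiv_le_iff a (c * b) _ hcb).mp (le_refl _))
  · rw [ceildiv_le_iff _ _ _ hcb]
    have h1 : a ≤ -(PySem.Int.floordiv (-a) c) * c :=
      (ceildiv_le_iff a c _ hc).mp (le_refl _)
    have h2 : -(PySem.Int.floordiv (-a) c) ≤ -(PySem.Int.floordiv (-(-(PySem.Int.floordiv (-a) c))) b) * b :=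
      (ceildiv_le_iff _ b _ hb).mp (le_refl _)
    calc a ≤ -(PySem.Int.floordiv (-a) c) * c := h1
      _ ≤ -(PySem.Int.floordiv (-(-(PySem.Int.floordiv (-a) c))) b) * b * c := by
          exact mul_le_mul_of_nonneg_right h2 (le_of_lt hc)
      _ = -(PySem.Int.floordiv (-(-(PySem.Int.floordiv (-a) c))) b) * (c * b) := by ring

-- ceil(a / c) ≥ 1 when a ≥ 1, c ≥ 1.
theorem one_le_ceildiv (a c : Int) (ha : 1 ≤ a) (hc : 1 ≤ c) :
    1 ≤ -(PySem.Int.floordiv (-a) c) := by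
  by_contra h
  push Not at h
  have := (ceildiv_le_iff a c 0 (by omega)).mp (by omega)
  omega

-- Main correspondence: A's loop from (d, cap) equals B's loop from (⌈n/cap⌉, d), same fuel.
theorem loop_corr (fuel : Nat) (d cap n base : Int) (hb : 2 ≤ base) (hcap : 1 ≤ cap) :
    ceilLogLoopA fuel d cap n base = ceilLogLoopB fuel (-(PySem.Int.floordiv (-n) cap)) base d := by
  induction fuel generalizing d cap with
  | zero => simp [ceilLogLoopA, ceilLogLoopB]
  | succ f ih =>
      have hcond : cap < n ↔ 1 < -(PySem.Int.floordiv (-n) cap) := by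
        constructor
        · intro h
          by_contra hle
          push Not at hle
          have := (ceildiv_le_iff n cap 1 (by omega)).mp hle
          omega
        · intro h
          by_contra hle
          push Not at hle
          have : -(PySem.Int.floordiv (-n) cap) ≤ 1 :=
            (ceildiv_le_iff n cap 1 (by omega)).mpr (by omega)
          omega
      simp only [ceilLogLoopA, ceilLogLoopB]
      by_cases h : cap < n
      · rw [if_pos h, if_pos (hcond.mp h)]
        rw [ih (d + 1) (cap * base) (by nlinarith)]
        rw [ceildiv_ceildiv n cap base (by omega) (by omega)]
      · rw [if_neg h, if_neg (fun hc => h (hcond.mpr hc))]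

-- ===== VERDICT (by name: the statement is the Claim_ definition above) =====
theorem ceil_log_spec : Claim_equal_ceil_log := by
  intro n base _ hpre
  unfold Spec_ceil_log ceil_log ceil_log_alt
  by_cases hn1 : 1 < n
  · -- loop of B runs at least once
    have hbase : 2 ≤ base := by
      rcases hpre with h | h
      · omega
      · exact h
    have hfirst : ceilLogLoopB 64 n base 0 =
        ceilLogLoopB 63 (-(PySem.Int.floordiv (-n) base)) base 1 := by
      show (if 1 < n then ceilLogLoopB 63 (-(PySem.Int.floordiv (-n) base)) base (0 + 1) else 0) = _
      rw [if_pos hn1]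
      norm_num
    by_cases hle : n ≤ base
    · rw [if_pos hle, hfirst]
      have hceil : -(PySem.Int.floordiv (-n) base) = 1 := by
        have h1 : 1 ≤ -(PySem.Int.floordiv (-n) base) := one_le_ceildiv n base (by omega) (by omega)
        have h2 : -(PySem.Int.floordiv (-n) base) ≤ 1 :=
          (ceildiv_le_iff n base 1 (by omega)).mpr (by omega)
        omega
      rw [hceil]
      show (1 : Int) = max 1 (ceilLogLoopB 63 1 base 1)
      show (1 : Int) = max 1 (if (1:Int) < 1 then ceilLogLoopB 62 (-(PySem.Int.floordiv (-1) base)) base (1 + 1) else 1)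
      simp
    · rw [if_neg hle, hfirst]
      rw [loop_corr 63 1 base n base hbase (by omega)]
      have := loopB_ge 63 (-(PySem.Int.floordiv (-n) base)) base 1
      omega
  · -- n ≤ 1: A returns 1 (n ≤ 1 < 2 ≤ base or n ≤ base directly), B's loop does not run
    have hA : (if n ≤ base then (1 : Int) else ceilLogLoopA 63 1 base n base) = 1 := by
      rcases hpre with h | h
      · rw [if_pos h]
      · rw [if_pos (by omega)]
    rw [hA]
    show (1 : Int) = max 1 (if 1 < n then ceilLogLoopB 63 (-(PySem.Int.floordiv (-n) base)) base (0 + 1) else 0)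
    rw [if_neg hn1]
    simp
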